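-- pv_equiv track=rewrite | github.com/bobhopp-crypto/retroverse-main | data/scripts/generate_hot100_detailed_histories.py | compute_zone_time
-- ===== SOURCE A (Python) =====
-- def compute_zone_time(history):
--     """
--     Compute time spent in each zone
--     Returns: dict with top10_time, top20_time, top40_time
--     """
--     top10_time = sum(1 for h in history if h['position'] and h['position'] <= 10)
--     top20_time = sum(1 for h in history if h['position'] and h['position'] <= 20)
--     top40_time = sum(1 for h in history if h['position'] and h['position'] <= 40)
--
--     return {
--         'top10_time': top10_time,
--         'top20_time': top20_time,
--         'top40_time': top40_time
--     }
-- ===== SOURCE B (Python) =====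
-- def compute_zone_time(history):
--     """
--     Compute time spent in each zone
--     Returns: dict with top10_time, top20_time, top40_time
--     """
--     top10 = top20 = top40 = 0
--     for h in history:
--         p = h['position']
--         if p and p <= 40:
--             top40 += 1
--             if p <= 20:
--                 top20 += 1
--                 if p <= 10:
--                     top10 += 1
--     return {
--         'top10_time': top10,
--         'top20_time': top20,
--         'top40_time': top40
--     }
-- ===== Notes on version B (the rewrite author's own statement) =====
-- stated objective: alternative
-- what changed: Replaces A's three filtering passes over history with a single traversal maintaining three cumulative counters, using the nesting top10 <= top20 <= top40.
import Mathlib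
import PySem

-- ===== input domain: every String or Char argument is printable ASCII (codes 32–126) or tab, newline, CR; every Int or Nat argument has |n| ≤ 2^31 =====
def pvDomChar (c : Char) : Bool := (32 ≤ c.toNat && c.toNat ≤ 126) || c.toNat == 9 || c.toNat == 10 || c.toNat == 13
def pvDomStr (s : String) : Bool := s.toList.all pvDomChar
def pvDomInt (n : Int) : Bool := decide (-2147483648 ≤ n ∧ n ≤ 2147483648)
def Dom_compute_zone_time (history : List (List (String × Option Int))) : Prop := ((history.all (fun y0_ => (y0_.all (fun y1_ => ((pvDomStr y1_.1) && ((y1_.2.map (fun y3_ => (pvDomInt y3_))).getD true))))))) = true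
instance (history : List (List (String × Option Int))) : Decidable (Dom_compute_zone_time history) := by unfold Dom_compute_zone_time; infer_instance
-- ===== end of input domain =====

-- B replaces A's three filtering passes with one traversal keeping three nested counters; same return value.

-- ===== PORT A =====
-- h['position'] on an entry (a dict str -> Optional[int]); missing key is excluded by Pre_ and read as none here
def pvPos (entry : List (String × Option Int)) : Option Int :=
  ((PySem.Dict.ofList entry).get? "position").getD none

-- sum(1 for h in history if h['position'] and h['position'] <= t)
def pvZoneCount (history : List (List (String × Option Int))) (t : Int) : Int :=
  history.foldl (fun acc entry =>
    match pvPos entry with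
    | none => acc
    | some v => if v ≠ 0 ∧ v ≤ t then acc + 1 else acc) 0

def compute_zone_time (history : List (List (String × Option Int))) : List (String × Int) :=
  [("top10_time", pvZoneCount history 10),
   ("top20_time", pvZoneCount history 20),
   ("top40_time", pvZoneCount history 40)]

-- ===== PORT B =====
-- one pass, nested counters (top10 ⊆ top20 ⊆ top40)
def pvStepB (acc : Int × Int × Int) (entry : List (String × Option Int)) : Int × Int × Int :=
  match pvPos entry with
  | none => acc
  | some v =>
    if v ≠ 0 ∧ v ≤ 40 then
      let acc := (acc.1, acc.2.1, acc.2.2 + 1)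
      if v ≤ 20 then
        let acc := (acc.1, acc.2.1 + 1, acc.2.2)
        if v ≤ 10 then (acc.1 + 1, acc.2.1, acc.2.2) else acc
      else acc
    else acc

def compute_zone_time_alt (history : List (List (String × Option Int))) : List (String × Int) :=
  let r := history.foldl pvStepB (0, 0, 0)
  [("top10_time", r.1), ("top20_time", r.2.1), ("top40_time", r.2.2)]

-- ===== PRECONDITION & SPEC =====
-- Pre_ excludes entries missing the 'position' key, on which both Pythons raise KeyError
def Pre_compute_zone_time (history : List (List (String × Option Int))) : Prop :=
  ∀ entry ∈ history, "position" ∈ entry.map (·.1)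
instance (history : List (List (String × Option Int))) : Decidable (Pre_compute_zone_time history) := by unfold Pre_compute_zone_time; infer_instance
def pvWitness_compute_zone_time : (List (List (String × Option Int))) :=
  [[("position", some 5)], [("position", none)], [("position", some 0)], [("position", some 33)]]

def Spec_compute_zone_time (history : List (List (String × Option Int))) (out : List (String × Int)) : Prop := out = compute_zone_time_alt history
instance (history : List (List (String × Option Int))) (out : List (String × Int)) : Decidable (Spec_compute_zone_time history out) := by unfold Spec_compute_zone_time; infer_instance

-- ===== CLAIM (what is proved, stated in full; the proofs are below) =====
def Claim_equal_compute_zone_time : Prop := ∀ (history : List (List (String × Option Int))), Dom_compute_zone_time history → Pre_compute_zone_time history → Spec_compute_zone_time history (compute_zone_time history)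

-- ===== LEMMAS AND PROOFS =====

theorem pvZoneCount_shift (rest : List (List (String × Option Int))) (t : Int) :
    ∀ acc : Int, rest.foldl (fun acc entry =>
      match pvPos entry with
      | none => acc
      | some v => if v ≠ 0 ∧ v ≤ t then acc + 1 else acc) acc
    = acc + pvZoneCount rest t := by
  induction rest with
  | nil => intro acc; simp [pvZoneCount]
  | cons e rest ih =>
    intro acc
    rw [List.foldl_cons, ih]
    conv_rhs => rw [pvZoneCount, List.foldl_cons, ih]
    cases hp : pvPos e with
    | none => simp
    | some v =>
      simp only []
      by_cases hv : v ≠ 0 ∧ v ≤ t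
      · rw [if_pos hv, if_pos hv]; omega
      · rw [if_neg hv, if_neg hv]; omega

theorem pvZoneCount_cons (e : List (String × Option Int))
    (rest : List (List (String × Option Int))) (t : Int) :
    pvZoneCount (e :: rest) t = pvZoneCount [e] t + pvZoneCount rest t := by
  rw [pvZoneCount, List.foldl_cons, pvZoneCount_shift rest t]
  simp [pvZoneCount]

theorem pvFoldB_eq (history : List (List (String × Option Int))) :
    ∀ a b c : Int, history.foldl pvStepB (a, b, c)
      = (a + pvZoneCount history 10, b + pvZoneCount history 20, c + pvZoneCount history 40) := by
  induction history with
  | nil => intro a b c; simp [pvZoneCount]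
  | cons e rest ih =>
    intro a b c
    rw [List.foldl_cons, pvZoneCount_cons e rest 10, pvZoneCount_cons e rest 20,
        pvZoneCount_cons e rest 40]
    cases hp : pvPos e with
    | none =>
      simp only [pvStepB, hp]
      rw [ih]
      simp [pvZoneCount, hp]
    | some v =>
      simp only [pvStepB, hp]
      by_cases h40 : v ≠ 0 ∧ v ≤ 40
      · by_cases h20 : v ≤ 20
        · by_cases h10 : v ≤ 10
          · have c10 : v ≠ 0 ∧ v ≤ 10 := ⟨h40.1, h10⟩
            have c20 : v ≠ 0 ∧ v ≤ 20 := ⟨h40.1, h20⟩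
            simp only [if_pos h40, if_pos h20, if_pos h10]
            rw [ih]
            simp [pvZoneCount, hp, c10, c20, h40]
            omega
          · have c10 : ¬ (v ≠ 0 ∧ v ≤ 10) := fun hc => h10 hc.2
            have c20 : v ≠ 0 ∧ v ≤ 20 := ⟨h40.1, h20⟩
            simp only [if_pos h40, if_pos h20, if_neg h10]
            rw [ih]
            simp [pvZoneCount, hp, c20, h40]
            omega
        · have c10 : ¬ (v ≠ 0 ∧ v ≤ 10) := fun hc => h20 (le_trans hc.2 (by norm_num))
          have c20 : ¬ (v ≠ 0 ∧ v ≤ 20) := fun hc => h20 hc.2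
          simp only [if_pos h40, if_neg h20]
          rw [ih]
          simp [pvZoneCount, hp, h40]
          omega
      · have c10 : ¬ (v ≠ 0 ∧ v ≤ 10) := fun hc => h40 ⟨hc.1, le_trans hc.2 (by norm_num)⟩
        have c20 : ¬ (v ≠ 0 ∧ v ≤ 20) := fun hc => h40 ⟨hc.1, le_trans hc.2 (by norm_num)⟩
        simp only [if_neg h40]
        rw [ih]
        simp [pvZoneCount, hp, c10, c20, h40]

-- ===== VERDICT (by name: the statement is the Claim_ definition above) =====
theorem compute_zone_time_spec : Claim_equal_compute_zone_time := by
  intro history _ _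
  unfold Spec_compute_zone_time compute_zone_time compute_zone_time_alt
  rw [pvFoldB_eq]
  simp
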